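-- pv_equiv track=rewrite | github.com/EngMohamedSaeed2001/Graduation-project-full | Back-end/src/main/machine learning/recommendation.py | recommend_properties_location
-- ===== SOURCE A (Python) =====
-- def recommend_properties_location(property_id, property_data):
--     # Get the location of the property with the given id
--     city = property_data[property_id]['city']
--
--     # Filter properties by location
--     similar_properties = [
--         pid for pid, prop in property_data.items() if prop['city'] == city and pid != property_id
--     ]
--
--     # If no properties are found in the same city, check the secondary city attribute
--     gov = property_data[property_id]['gov']
--     similar_properties += [
--         pid for pid, prop in property_data.items() if prop['gov'] == gov and pid != property_id
--     ]
--
--     return similar_properties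
-- ===== SOURCE B (Python) =====
-- def recommend_properties_location(property_id, property_data):
--     entry = property_data[property_id]
--     city = entry['city']
--     gov = entry['gov']
--     city_list = []
--     gov_list = []
--     for pid, prop in property_data.items():
--         if pid != property_id:
--             if prop['city'] == city:
--                 city_list.append(pid)
--             if prop['gov'] == gov:
--                 gov_list.append(pid)
--     return city_list + gov_list
-- ===== Notes on version B (the rewrite author's own statement) =====
-- stated objective: alternative
-- what changed: Replaces A's two full comprehension scans (one per attribute, each re-reading prop['city']/prop['gov'] and re-testing pid) by a single traversal that hoists the pid != property_id guard and fills two buckets at once, concatenated at the end.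
import Mathlib
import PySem

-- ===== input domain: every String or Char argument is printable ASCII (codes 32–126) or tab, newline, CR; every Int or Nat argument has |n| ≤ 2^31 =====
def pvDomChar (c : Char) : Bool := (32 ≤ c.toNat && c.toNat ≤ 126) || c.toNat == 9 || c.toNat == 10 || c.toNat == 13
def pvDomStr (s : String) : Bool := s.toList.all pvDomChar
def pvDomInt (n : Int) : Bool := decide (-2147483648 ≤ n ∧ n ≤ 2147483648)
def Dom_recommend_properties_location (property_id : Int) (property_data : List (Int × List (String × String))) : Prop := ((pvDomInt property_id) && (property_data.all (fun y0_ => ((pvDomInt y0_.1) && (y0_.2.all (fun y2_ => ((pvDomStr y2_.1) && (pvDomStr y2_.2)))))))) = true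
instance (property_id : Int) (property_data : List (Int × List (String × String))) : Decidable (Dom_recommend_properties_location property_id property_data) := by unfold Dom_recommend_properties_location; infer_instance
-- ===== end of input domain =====

-- B fuses A's two comprehension scans into one traversal filling two buckets (objective: alternative, same cost).
-- dict lookup: first match in the association list (the Python dict has unique keys)
def pvLookup (d : List (Int × List (String × String))) (k : Int) : List (String × String) :=
  ((d.find? (fun p => p.1 == k)).map (·.2)).getD []

def pvGetS (d : List (String × String)) (k : String) : String :=
  ((d.find? (fun p => p.1 == k)).map (·.2)).getD ""

-- ===== PORT A =====
def recommend_properties_location (property_id : Int) (property_data : List (Int × List (String × String))) : List Int :=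
  let city := pvGetS (pvLookup property_data property_id) "city"
  let similar := (property_data.filter
    (fun p => pvGetS p.2 "city" == city && p.1 != property_id)).map (·.1)
  let gov := pvGetS (pvLookup property_data property_id) "gov"
  similar ++ (property_data.filter
    (fun p => pvGetS p.2 "gov" == gov && p.1 != property_id)).map (·.1)

-- ===== PORT B =====
def recommend_properties_location_alt (property_id : Int) (property_data : List (Int × List (String × String))) : List Int :=
  let entry := pvLookup property_data property_id
  let city := pvGetS entry "city"
  let gov := pvGetS entry "gov"
  let buckets := property_data.foldl
    (fun acc p =>
      if p.1 != property_id then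
        ((if pvGetS p.2 "city" == city then acc.1 ++ [p.1] else acc.1),
         (if pvGetS p.2 "gov" == gov then acc.2 ++ [p.1] else acc.2))
      else acc)
    ([], [])
  buckets.1 ++ buckets.2

-- ===== PRECONDITION & SPEC =====
-- Pre_ excludes exactly the inputs where the Python A raises KeyError: property_id not a key of
-- property_data, or some property's dict missing the 'city' or 'gov' key.
def Pre_recommend_properties_location (property_id : Int) (property_data : List (Int × List (String × String))) : Prop :=
  property_data.any (fun p => p.1 == property_id) = true ∧
  ∀ p ∈ property_data, (p.2.any (fun q => q.1 == "city")) = true ∧ (p.2.any (fun q => q.1 == "gov")) = true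
instance (property_id : Int) (property_data : List (Int × List (String × String))) : Decidable (Pre_recommend_properties_location property_id property_data) := by unfold Pre_recommend_properties_location; infer_instance

def pvWitness_recommend_properties_location : Int × (List (Int × List (String × String))) :=
  (1, [(1, [("city", "x"), ("gov", "g")]), (2, [("city", "x"), ("gov", "h")]), (3, [("city", "y"), ("gov", "g")])])

def Spec_recommend_properties_location (property_id : Int) (property_data : List (Int × List (String × String))) (out : List Int) : Prop := out = recommend_properties_location_alt property_id property_data
instance (property_id : Int) (property_data : List (Int × List (String × String))) (out : List Int) : Decidable (Spec_recommend_properties_location property_id property_data out) := by unfold Spec_recommend_properties_location; infer_instance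

-- ===== CLAIM (what is proved, stated in full; the proofs are below) =====
def Claim_equal_recommend_properties_location : Prop := ∀ (property_id : Int) (property_data : List (Int × List (String × String))), Dom_recommend_properties_location property_id property_data → Pre_recommend_properties_location property_id property_data → Spec_recommend_properties_location property_id property_data (recommend_properties_location property_id property_data)

-- ===== LEMMAS AND PROOFS =====
-- The fused fold produces (acc₁ ++ city-filter, acc₂ ++ gov-filter).
theorem pv_fold_buckets (property_id : Int) (city gov : String)
    (l : List (Int × List (String × String))) :
    ∀ (c g : List Int),
      l.foldl (fun acc p =>
        if p.1 != property_id then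
          ((if pvGetS p.2 "city" == city then acc.1 ++ [p.1] else acc.1),
           (if pvGetS p.2 "gov" == gov then acc.2 ++ [p.1] else acc.2))
        else acc) (c, g)
      = (c ++ (l.filter (fun p => pvGetS p.2 "city" == city && p.1 != property_id)).map (·.1),
         g ++ (l.filter (fun p => pvGetS p.2 "gov" == gov && p.1 != property_id)).map (·.1)) := by
  induction l with
  | nil => intro c g; simp
  | cons p l ih =>
    intro c g
    rw [List.foldl_cons, ih]
    by_cases hp : p.1 = property_id
    · simp [hp, List.filter_cons]
    · by_cases hc : pvGetS p.2 "city" = city <;> by_cases hg : pvGetS p.2 "gov" = gov <;>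
        simp [hp, hc, hg, List.filter_cons]

-- ===== VERDICT (by name: the statement is the Claim_ definition above) =====
theorem recommend_properties_location_spec : Claim_equal_recommend_properties_location := by
  intro property_id property_data _ _
  unfold Spec_recommend_properties_location recommend_properties_location recommend_properties_location_alt
  simp only [pv_fold_buckets, List.nil_append]
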